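-- pv_equiv track=rewrite | github.com/apache/incubator-heron | heron/explore/src/python/args.py | insert_bool
-- ===== SOURCE A (Python) =====
-- def insert_bool(param, command_args):
--   index = 0
--   found = False
--   for lelem in command_args:
--     if lelem == '--' and not found:
--       break
--     if lelem == param:
--       found = True
--       break
--     index = index + 1
--
--   if found:
--     command_args.insert(index + 1, 'True')
--   return command_args
-- ===== SOURCE B (Python) =====
-- def insert_bool(param, command_args):
--   cut = command_args.index('--') if '--' in command_args else len(command_args)
--   head = command_args[:cut]
--   if param in head:
--     command_args.insert(head.index(param) + 1, 'True')
--   return command_args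
-- ===== Notes on version B (the rewrite author's own statement) =====
-- stated objective: simpler
-- what changed: Replaces the interleaved index/found scanning loop with a boundary-first decomposition: compute the '--' cutoff, then a membership/index lookup on the prefix decides the insertion point.
import Mathlib
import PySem

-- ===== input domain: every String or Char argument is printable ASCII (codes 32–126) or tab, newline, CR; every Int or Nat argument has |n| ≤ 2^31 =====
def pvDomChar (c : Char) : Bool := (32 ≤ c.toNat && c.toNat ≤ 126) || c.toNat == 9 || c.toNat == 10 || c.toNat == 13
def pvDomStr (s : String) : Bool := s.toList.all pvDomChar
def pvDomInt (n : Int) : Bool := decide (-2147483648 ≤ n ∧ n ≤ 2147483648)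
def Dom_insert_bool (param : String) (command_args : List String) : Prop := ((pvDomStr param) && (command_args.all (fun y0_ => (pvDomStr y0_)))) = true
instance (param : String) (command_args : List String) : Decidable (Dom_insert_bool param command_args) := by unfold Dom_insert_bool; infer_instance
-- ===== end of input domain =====

-- B replaces A's interleaved index/found scanning loop by a boundary-first decomposition
-- ('--' cutoff, then prefix membership/index) — objective: simpler.  Both A and B mutate
-- command_args in place in Python in the same way; the theorems are about the return value.

-- ===== PORT A =====
-- the for-loop of A: returns the final (index, found) pair at break/exit
def insertBoolLoop (param : String) : List String → Nat × Bool
  | [] => (0, false)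
  | x :: xs =>
    if x = "--" then (0, false)            -- 'found' is always False when this test runs
    else if x = param then (0, true)
    else
      let r := insertBoolLoop param xs
      (r.1 + 1, r.2)

def insert_bool (param : String) (command_args : List String) : List String :=
  let r := insertBoolLoop param command_args
  if r.2 then PySem.List.insert command_args (r.1 + 1) "True" else command_args

-- ===== PORT B =====
def insert_bool_alt (param : String) (command_args : List String) : List String :=
  let cut := (PySem.List.index? command_args "--").getD command_args.length
  let head := command_args.take cut
  if param ∈ head then
    PySem.List.insert command_args (((PySem.List.index? head param).getD 0) + 1) "True"
  else
    command_args

-- ===== PRECONDITION & SPEC =====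
def Spec_insert_bool (param : String) (command_args : List String) (out : List String) : Prop := out = insert_bool_alt param command_args
instance (param : String) (command_args : List String) (out : List String) : Decidable (Spec_insert_bool param command_args out) := by unfold Spec_insert_bool; infer_instance

-- ===== CLAIM (what is proved, stated in full; the proofs are below) =====
def Claim_equal_insert_bool : Prop := ∀ (param : String) (command_args : List String), Dom_insert_bool param command_args → Spec_insert_bool param command_args (insert_bool param command_args)

-- ===== LEMMAS AND PROOFS =====

-- characterisation of A's loop by B's head = take-to-'--' prefix
theorem insertBoolLoop_char (param : String) (ca : List String) :
    (match PySem.List.index? (ca.take ((PySem.List.index? ca "--").getD ca.length)) param with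
     | some i => insertBoolLoop param ca = (i, true)
     | none => (insertBoolLoop param ca).2 = false : Prop) := by
  induction ca with
  | nil => simp [PySem.List.index?, insertBoolLoop]
  | cons x xs ih =>
    by_cases hdd : x = "--"
    · subst hdd
      rw [PySem.List.index?_cons_self]
      simp [insertBoolLoop]
    · rw [PySem.List.index?_cons_of_ne xs hdd]
      have hcut : ((PySem.List.index? xs "--").map (· + 1)).getD (x :: xs).length
          = ((PySem.List.index? xs "--").getD xs.length) + 1 := by
        cases PySem.List.index? xs "--" <;> simp
      rw [hcut]
      rw [List.take_succ_cons]
      by_cases hp : x = param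
      · subst hp
        rw [PySem.List.index?_cons_self]
        simp [insertBoolLoop, hdd]
      · rw [PySem.List.index?_cons_of_ne (xs.take ((PySem.List.index? xs "--").getD xs.length)) hp]
        cases h : PySem.List.index? (xs.take ((PySem.List.index? xs "--").getD xs.length)) param with
        | some i =>
          have := ih; rw [h] at this
          simp [insertBoolLoop, hdd, hp, this]
        | none =>
          have := ih; rw [h] at this
          simp [insertBoolLoop, hdd, hp, this]

-- ===== VERDICT (by name: the statement is the Claim_ definition above) =====
theorem insert_bool_spec : Claim_equal_insert_bool := by
  intro param ca _
  unfold Spec_insert_bool insert_bool insert_bool_alt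
  have h := insertBoolLoop_char param ca
  cases hidx : PySem.List.index? (ca.take ((PySem.List.index? ca "--").getD ca.length)) param with
  | some i =>
    rw [hidx] at h
    have hmem : param ∈ ca.take ((PySem.List.index? ca "--").getD ca.length) :=
      (PySem.List.index?_isSome_iff _ _).1 (by rw [hidx]; rfl)
    simp only [h, hidx, if_pos hmem, Option.getD_some]
    simp
  | none =>
    rw [hidx] at h
    have hnm : ¬ param ∈ ca.take ((PySem.List.index? ca "--").getD ca.length) :=
      (PySem.List.index?_eq_none_iff _ _).1 hidx
    simp only [h, Bool.false_eq_true, if_false, if_neg hnm]
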